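-- pv_equiv track=rewrite | github.com/CarterCribbs/CS101 | APTs/APT4/TxMsg.py | transform
-- ===== SOURCE A (Python) =====
-- def transform(word):
--     indexcount = 1
--     consonantcount = 0
--     consonants = "bcdfghjklmnpqrstvwxyz"
--     newstring =""
--     for item in word:
--         if item in consonants:
--             consonantcount +=1
--     if consonantcount == 0:
--         return word
--     for item in word[1:]:
--         if word[indexcount] in consonants and word[indexcount-1] not in consonants:
--             newstring += item
--         indexcount +=1
--     if word[0] in consonants:
--         firstconsonant = word[0]
--         finalresult = firstconsonant + newstring
--         return finalresult
--     else:
--         finalresult = newstring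
--         return finalresult
-- ===== SOURCE B (Python) =====
-- def transform(word):
--     cons = set("bcdfghjklmnpqrstvwxyz")
--     parts = []
--     i, n = 0, len(word)
--     while i < n:
--         j = i + 1
--         while j < n and (word[j] in cons) == (word[i] in cons):
--             j += 1
--         if word[i] in cons:
--             parts.append(word[i])
--         i = j
--     res = "".join(parts)
--     return res if res else word
-- ===== Notes on version B (the rewrite author's own statement) =====
-- stated objective: simpler
-- what changed: A counts consonants in a first pass, then scans word[1:] comparing word[i] with word[i-1] via explicit index bookkeeping and finally patches word[0] on; B makes one pass that splits the word into maximal consonant/non-consonant runs, takes each consonant run's first character, and falls back to the original word when the result is empty.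
import Mathlib
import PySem

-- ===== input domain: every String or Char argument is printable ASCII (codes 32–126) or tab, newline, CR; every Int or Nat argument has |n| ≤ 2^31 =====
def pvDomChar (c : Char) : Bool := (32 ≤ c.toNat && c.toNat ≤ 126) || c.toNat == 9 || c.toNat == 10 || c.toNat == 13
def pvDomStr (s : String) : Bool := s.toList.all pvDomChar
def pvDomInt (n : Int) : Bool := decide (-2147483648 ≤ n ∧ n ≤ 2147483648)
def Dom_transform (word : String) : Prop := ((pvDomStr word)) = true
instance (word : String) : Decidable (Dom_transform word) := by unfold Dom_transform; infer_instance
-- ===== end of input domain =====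

-- B replaces A's counting pass + index-bookkeeping scan by grouping the word into
-- maximal consonant/non-consonant runs and emitting each consonant run's first char (objective: simpler).


-- ===== PORT A =====
-- consonants = "bcdfghjklmnpqrstvwxyz"
def consChars : List Char := "bcdfghjklmnpqrstvwxyz".toList

-- 'item in consonants' (single char in a string) is exact as Chars.isIn of the singleton
def inConsA (c : Char) : Bool := PySem.Chars.isIn [c] consChars

-- one step of A's second loop (the body of 'for item in word[1:]', state = (indexcount, newstring))
def aBody (cs : List Char) (st : Int × List Char) (item : Char) : Int × List Char :=
  let ok :=
    match PySem.List.pyGet? cs st.1, PySem.List.pyGet? cs (st.1 - 1) with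
    | some a, some b => inConsA a && !(inConsA b)
    | _, _ => false   -- unreachable: indexcount stays in range
  (st.1 + 1, if ok then st.2 ++ [item] else st.2)

-- A's second loop over word[1:], indexcount starting at 1, newstring starting empty
def aLoop (cs : List Char) : Int × List Char :=
  (PySem.List.slice cs (some 1) none).foldl (aBody cs) ((1 : Int), ([] : List Char))

def transform (word : String) : String :=
  if (word.toList.foldl (fun acc item => if inConsA item then acc + 1 else acc) (0 : Int)) == 0
  then word
  else
    match PySem.List.pyGet? word.toList 0 with
    | some c0 =>
        if inConsA c0 then String.mk (c0 :: (aLoop word.toList).2)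
        else String.mk (aLoop word.toList).2
    | none => String.mk (aLoop word.toList).2  -- unreachable: count ≠ 0 ⇒ word nonempty

-- ===== PORT B =====
-- cons = set("bcdfghjklmnpqrstvwxyz")
def consSet : PySem.Set Char := PySem.Set.ofList consChars

def inConsB (c : Char) : Bool := PySem.Set.contains consSet c

-- the outer while loop: each step consumes one maximal run (inner while = takeWhile/dropWhile)
def altGo (cs : List Char) : List Char :=
  match cs with
  | [] => []
  | c :: t =>
    let rest := t.dropWhile (fun d => inConsB d == inConsB c)
    (if inConsB c then [c] else []) ++ altGo rest
termination_by cs.length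
decreasing_by
  simp only [List.length_cons]
  exact Nat.lt_succ_of_le (List.length_dropWhile_le _ t)

def transform_alt (word : String) : String :=
  let r := altGo word.toList
  if r.isEmpty then word else String.mk r

-- ===== PRECONDITION & SPEC =====
def Spec_transform (word : String) (out : String) : Prop := out = transform_alt word
instance (word : String) (out : String) : Decidable (Spec_transform word out) := by unfold Spec_transform; infer_instance

-- ===== CLAIM (what is proved, stated in full; the proofs are below) =====
def Claim_equal_transform : Prop := ∀ (word : String), Dom_transform word → Spec_transform word (transform word)

-- ===== LEMMAS AND PROOFS =====

-- both membership tests are plain membership in consChars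
theorem inConsA_eq (c : Char) : inConsA c = consChars.contains c := by
  unfold inConsA
  rcases h : consChars.contains c with _ | _
  · simp only [List.contains_eq_mem, decide_eq_false_iff_not] at h
    rw [PySem.Chars.isIn_eq_false_iff]
    intro hinf
    exact h (hinf.subset (List.mem_singleton_self c))
  · simp only [List.contains_eq_mem, decide_eq_true_eq] at h
    rw [PySem.Chars.isIn_iff_infix]
    obtain ⟨s, t, hst⟩ := List.append_of_mem h
    exact ⟨s, t, by simp [hst]⟩

theorem inConsB_eq (c : Char) : inConsB c = consChars.contains c := by
  have hset : consSet = consChars := by decide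
  simp [inConsB, hset]

theorem inConsB_eq_inConsA (c : Char) : inConsB c = inConsA c := by
  rw [inConsA_eq, inConsB_eq]

-- the common form: first char of every maximal consonant run, threading the previous char's status
def pick (prev : Bool) : List Char → List Char
  | [] => []
  | c :: t => (if inConsA c && !prev then [c] else []) ++ pick (inConsA c) t

-- pick swallows a block of chars all of status b without changing the carried status
theorem pick_all_eq (b : Bool) : ∀ (run rest : List Char),
    (∀ d ∈ run, inConsA d = b) → pick b (run ++ rest) = pick b rest := by
  intro run
  induction run with
  | nil => intro rest _; rfl
  | cons c t ih =>
    intro rest h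
    have hc : inConsA c = b := h c (List.mem_cons_self ..)
    simp [pick, hc, List.cons_append, ih rest fun d hd => h d (List.mem_cons_of_mem _ hd)]

-- if the next char's status differs from the carried one, the carried status may be reset to false
theorem pick_reset (b : Bool) (l : List Char)
    (h : ∀ c, l.head? = some c → inConsA c ≠ b) : pick b l = pick false l := by
  cases l with
  | nil => rfl
  | cons c t =>
    have := h c rfl
    cases hb : b
    · rfl
    · simp [pick]
      cases hc : inConsA c
      · simp
      · exact absurd (hb ▸ hc) this

theorem altGo_eq_pick : ∀ (cs : List Char), altGo cs = pick false cs := by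
  intro cs
  induction hn : cs.length using Nat.strong_induction_on generalizing cs with
  | _ n ih =>
    cases cs with
    | nil => rw [altGo]; rfl
    | cons c t =>
      rw [altGo]
      have hsplit : t = t.takeWhile (fun d => inConsB d == inConsB c) ++
          t.dropWhile (fun d => inConsB d == inConsB c) := (List.takeWhile_append_dropWhile).symm
      have hrunstat : ∀ d ∈ t.takeWhile (fun d => inConsB d == inConsB c), inConsA d = inConsA c := by
        intro d hd
        have := List.mem_takeWhile_imp hd
        simp only [beq_iff_eq] at this
        rw [← inConsB_eq_inConsA, this, inConsB_eq_inConsA]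
      have hrest : ∀ e, (t.dropWhile (fun d => inConsB d == inConsB c)).head? = some e →
          inConsA e ≠ inConsA c := by
        intro e he heq
        have hh := List.head?_dropWhile_not (fun d => inConsB d == inConsB c) t
        rw [he] at hh
        simp only [] at hh
        rw [beq_eq_false_iff_ne] at hh
        exact hh (by rw [inConsB_eq_inConsA, inConsB_eq_inConsA, heq])
      have hlen : (t.dropWhile (fun d => inConsB d == inConsB c)).length < n := by
        subst hn
        simp only [List.length_cons]
        exact Nat.lt_succ_of_le (List.length_dropWhile_le _ t)
      have ihrest := ih _ hlen (t.dropWhile (fun d => inConsB d == inConsB c)) rfl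
      conv_rhs => rw [pick, hsplit]
      rw [pick_all_eq (inConsA c) _ _ hrunstat, pick_reset _ _ hrest, ← ihrest]
      simp [inConsB_eq_inConsA]

-- pick false is empty iff there is no consonant
theorem pick_false_eq_nil_iff : ∀ (cs : List Char),
    (pick false cs = [] ↔ ∀ c ∈ cs, inConsA c = false) := by
  intro cs
  induction cs with
  | nil => simp [pick]
  | cons c t ih =>
    cases hc : inConsA c
    · simp [pick, hc, ih]
    · simp [pick, hc]

-- A's counting loop counts the consonants
theorem count_eq (cs : List Char) :
    cs.foldl (fun acc item => if inConsA item then acc + 1 else acc) 0 =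
      (cs.countP (fun c => inConsA c) : Int) := by
  simpa using PySem.List.foldl_count_if (fun c => inConsA c) cs 0

-- A's main loop computed from a suffix: equals pick with the previous char's status
theorem loopA (cs : List Char) : ∀ (l : List Char) (k : Nat) (acc : List Char),
    cs.drop k = l → 1 ≤ k →
    ((l.foldl (aBody cs) ((k : Int), acc)).2 = acc ++ pick (inConsA (cs.getD (k - 1) 'a')) l) := by
  intro l
  induction l with
  | nil => intro k acc _ _; simp [pick]
  | cons c t ih =>
    intro k acc hdrop hk
    have hklt : k < cs.length := by
      by_contra h
      rw [List.drop_eq_nil_of_le (Nat.le_of_not_lt h)] at hdrop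
      exact List.cons_ne_nil _ _ hdrop.symm
    have hck : cs[k]? = some c := by
      have := congrArg List.head? hdrop
      rwa [List.head?_drop] at this
    have hk1 : k - 1 < cs.length := Nat.lt_of_le_of_lt (Nat.sub_le k 1) hklt
    have hgk : PySem.List.pyGet? cs ((k : Int)) = some c := by
      rw [PySem.List.pyGet?_natCast, hck]
    have hgk1 : PySem.List.pyGet? cs ((k : Int) - 1) = some (cs.getD (k - 1) 'a') := by
      have : (k : Int) - 1 = ((k - 1 : Nat) : Int) := by omega
      rw [this, PySem.List.pyGet?_natCast, List.getElem?_eq_getElem hk1,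
        List.getD_eq_getElem cs 'a' hk1]
    have hdrop' : cs.drop (k + 1) = t := by
      rw [← List.drop_drop, hdrop]; rfl
    have hgd : cs.getD (k + 1 - 1) 'a' = c := by
      simp only [Nat.add_sub_cancel, List.getD_eq_getElem?_getD, hck, Option.getD_some]
    simp only [List.foldl_cons, aBody, hgk, hgk1]
    have step := ih (k + 1) (if inConsA c && !(inConsA (cs.getD (k - 1) 'a')) then acc ++ [c] else acc)
      (by exact_mod_cast hdrop') (by omega)
    rw [hgd] at step
    have hcast : ((k : Int)) + 1 = ((k + 1 : Nat) : Int) := by push_cast; ring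
    rw [show ((k:Int) + 1, if inConsA c && !(inConsA (cs.getD (k-1) 'a')) then acc ++ [c] else acc)
        = (((k+1 : Nat) : Int), if inConsA c && !(inConsA (cs.getD (k-1) 'a')) then acc ++ [c] else acc)
      by rw [hcast]]
    rw [step, pick]
    cases inConsA c && !(inConsA (cs.getD (k - 1) 'a')) <;> simp

-- characterisation of A
theorem transform_eq (word : String) :
    transform word =
      if word.toList.countP (fun c => inConsA c) = 0 then word
      else String.mk (pick false word.toList) := by
  unfold transform
  rw [count_eq word.toList]
  have hcast : ((word.toList.countP (fun c => inConsA c) : Int) == 0) =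
      decide (word.toList.countP (fun c => inConsA c) = 0) := by
    by_cases h : word.toList.countP (fun c => inConsA c) = 0
    · simp [h]
    · simp [h, beq_eq_false_iff_ne, Int.natCast_eq_zero]
  rw [hcast]
  by_cases h0 : word.toList.countP (fun c => inConsA c) = 0
  · simp [h0]
  · simp only [h0, decide_false, if_neg, Bool.false_eq_true, not_false_eq_true]
    cases hcs : word.toList with
    | nil => simp [hcs, List.countP_nil] at h0
    | cons c0 rest =>
      have hget0 : PySem.List.pyGet? (c0 :: rest) (0 : Int) = some c0 := by
        rw [show (0 : Int) = ((0 : Nat) : Int) by rfl, PySem.List.pyGet?_natCast]; rfl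
      have hslice : PySem.List.slice (c0 :: rest) (some 1) none = rest := by
        rw [PySem.List.slice_from_one]; rfl
      have hloop := loopA (c0 :: rest) rest 1 [] rfl le_rfl
      simp only [Nat.sub_self, List.getD_cons_zero] at hloop
      simp only [aLoop, hslice, hget0]
      rw [show ((1 : Int), ([] : List Char)) = (((1 : Nat) : Int), ([] : List Char)) by norm_num]
      rw [hloop]
      cases hc0 : inConsA c0 <;> simp [pick, hc0]

-- ===== VERDICT (by name: the statement is the Claim_ definition above) =====
theorem transform_spec : Claim_equal_transform := by
  intro word _
  unfold Spec_transform transform_alt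
  rw [transform_eq, altGo_eq_pick]
  by_cases h0 : word.toList.countP (fun c => inConsA c) = 0
  · have hnil : pick false word.toList = [] := by
      rw [pick_false_eq_nil_iff]
      intro c hc
      simpa using (List.countP_eq_zero.mp h0) c hc
    simp [h0, hnil]
  · have hne : pick false word.toList ≠ [] := by
      intro h
      rw [pick_false_eq_nil_iff] at h
      have : word.toList.countP (fun c => inConsA c) = 0 :=
        List.countP_eq_zero.mpr (by intro c hc; simpa using h c hc)
      exact h0 this
    simp [h0, List.isEmpty_iff, hne]
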